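-- pv_equiv track=rewrite | github.com/harel-coffee/upclass-auto | scripts/embedding_mlp.py | iterate_doc
-- ===== SOURCE A (Python) =====
-- def iterate_doc(doc, word_index):
--     encoded_doc = []
--     word_count = {}
--     for word in doc:
--         if word in word_index:
--             wi = word_index[word]
--             encoded_doc.append(wi)
--             if word not in word_count:
--                 word_count[word] = 0
--             word_count[word] += 1
--     return encoded_doc, word_count
-- ===== SOURCE B (Python) =====
-- def iterate_doc(doc, word_index):
--     # inverted index: word -> positions among the kept words
--     positions = {}
--     n = 0
--     for word in doc:
--         if word in word_index:
--             positions.setdefault(word, []).append(n)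
--             n += 1
--     encoded_doc = [0] * n
--     word_count = {}
--     for word, ps in positions.items():
--         wi = word_index[word]
--         for p in ps:
--             encoded_doc[p] = wi
--         word_count[word] = len(ps)
--     return encoded_doc, word_count
-- ===== Notes on version B (the rewrite author's own statement) =====
-- stated objective: alternative
-- what changed: Replaces A's single fused loop (append index, bump count per word) by an inverted-index algorithm: one pass builds word->positions groups, then the encoded list is assembled by scattering each word's index value into a preallocated buffer (one word_index lookup per distinct word) and counts are read off as group sizes.
import Mathlib
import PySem

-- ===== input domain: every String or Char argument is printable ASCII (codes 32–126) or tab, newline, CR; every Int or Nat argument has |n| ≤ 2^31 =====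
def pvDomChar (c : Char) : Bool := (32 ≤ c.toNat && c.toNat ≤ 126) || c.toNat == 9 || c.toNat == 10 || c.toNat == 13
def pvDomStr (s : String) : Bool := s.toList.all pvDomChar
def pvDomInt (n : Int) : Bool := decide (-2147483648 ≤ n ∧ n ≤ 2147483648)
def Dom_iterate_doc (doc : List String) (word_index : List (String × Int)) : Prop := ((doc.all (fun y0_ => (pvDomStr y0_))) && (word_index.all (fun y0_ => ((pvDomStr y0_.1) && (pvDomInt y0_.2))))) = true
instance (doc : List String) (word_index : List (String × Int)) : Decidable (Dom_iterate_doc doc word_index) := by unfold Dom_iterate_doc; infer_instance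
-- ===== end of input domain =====

-- B replaces A's single fused loop by an inverted-index algorithm: one pass groups positions per word, then the encoded list is assembled by scattering each word's index value into a preallocated buffer and counts are the group sizes — same results by a different algorithm.


-- dict lookup on the association list: first match (the dict type convention)
def pvLookup (word_index : List (String × Int)) (w : String) : Option Int :=
  (word_index.find? (fun p => p.1 == w)).map (·.2)

-- ===== PORT A =====
-- A's fused loop: one pass, state (encoded_doc, word_count); 'if word not in word_count: word_count[word]=0' then '+= 1'
def iterate_doc (doc : List String) (word_index : List (String × Int)) : List Int × (List (String × Int)) :=
  let st := doc.foldl (fun (st : List Int × PySem.Dict String Int) word =>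
      match pvLookup word_index word with
      | none => st
      | some wi =>
        let enc := st.1 ++ [wi]
        let d := if st.2.contains word then st.2 else st.2.insert word 0
        (enc, d.insert word (d.getD word 0 + 1)))
    ([], PySem.Dict.empty)
  (st.1, st.2.items)

-- ===== PORT B =====
-- pass 1: inverted index word -> positions among kept words (positions.setdefault(word, []).append(n); n += 1)
-- pass 2: scatter word_index[word] into a preallocated [0]*n buffer at each position; counts = group sizes
def iterate_doc_alt (doc : List String) (word_index : List (String × Int)) : List Int × (List (String × Int)) :=
  let st := doc.foldl (fun (st : PySem.Dict String (List Nat) × Nat) word =>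
      if (pvLookup word_index word).isSome then
        (st.1.modify word [] (· ++ [st.2]), st.2 + 1)
      else st) (PySem.Dict.empty, 0)
  let positions := st.1
  let n := st.2
  let fin := positions.items.foldl
      (fun (acc : List Int × PySem.Dict String Int) pr =>
        let wi := (pvLookup word_index pr.1).getD 0
        (pr.2.foldl (fun enc p => enc.set p wi) acc.1,
         acc.2.insert pr.1 (pr.2.length : Int)))
      (List.replicate n (0 : Int), PySem.Dict.empty)
  (fin.1, fin.2.items)

-- ===== PRECONDITION & SPEC =====
def Spec_iterate_doc (doc : List String) (word_index : List (String × Int)) (out : List Int × (List (String × Int))) : Prop := out = iterate_doc_alt doc word_index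
instance (doc : List String) (word_index : List (String × Int)) (out : List Int × (List (String × Int))) : Decidable (Spec_iterate_doc doc word_index out) := by unfold Spec_iterate_doc; infer_instance

-- ===== CLAIM (what is proved, stated in full; the proofs are below) =====
def Claim_equal_iterate_doc : Prop := ∀ (doc : List String) (word_index : List (String × Int)), Dom_iterate_doc doc word_index → Spec_iterate_doc doc word_index (iterate_doc doc word_index)

-- ===== LEMMAS AND PROOFS =====

-- A's per-word dict update ('if not in: = 0; += 1') IS a counter step (modify word 0 (·+1))
theorem stepA_eq_modify (d : PySem.Dict String Int) (w : String) :
    (let d1 := if d.contains w then d else d.insert w 0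
     d1.insert w (d1.getD w 0 + 1)) = d.modify w 0 (· + 1) := by
  by_cases h : d.contains w = true
  · simp [h, PySem.Dict.modify]
  · simp only [Bool.not_eq_true] at h
    simp [h, PySem.Dict.insert_insert_self, PySem.Dict.getD_insert_self,
      PySem.Dict.getD_of_not_contains _ _ h, PySem.Dict.modify]

-- A's fused fold, with both state components generalized, splits into a map and a counter fold over the kept words
theorem foldA_split (word_index : List (String × Int)) (doc : List String)
    (acc : List Int) (d : PySem.Dict String Int) :
    doc.foldl (fun (st : List Int × PySem.Dict String Int) word =>
      match pvLookup word_index word with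
      | none => st
      | some wi =>
        let enc := st.1 ++ [wi]
        let d' := if st.2.contains word then st.2 else st.2.insert word 0
        (enc, d'.insert word (d'.getD word 0 + 1))) (acc, d)
    = (acc ++ (doc.filter (fun w => (pvLookup word_index w).isSome)).map
            (fun w => (pvLookup word_index w).getD 0),
       (doc.filter (fun w => (pvLookup word_index w).isSome)).foldl
            (fun d w => d.modify w 0 (· + 1)) d) := by
  induction doc generalizing acc d with
  | nil => simp
  | cons w rest ih =>
    cases hlk : pvLookup word_index w with
    | none => simp [List.foldl_cons, hlk, ih]
    | some wi =>
      simp only [List.foldl_cons, hlk]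
      rw [stepA_eq_modify, ih]
      simp [hlk]

-- B's first pass: the position-counter fold IS a grouping fold over zipIdx
theorem foldB1_eq_zipIdx (l : List String) (d : PySem.Dict String (List Nat)) (k : Nat) :
    l.foldl (fun (st : PySem.Dict String (List Nat) × Nat) w =>
        (st.1.modify w [] (· ++ [st.2]), st.2 + 1)) (d, k)
    = ((l.zipIdx k).foldl (fun d p => d.modify p.1 [] (· ++ [p.2])) d, k + l.length) := by
  induction l generalizing d k with
  | nil => simp
  | cons w rest ih => simp [List.zipIdx_cons, ih]; omega

-- the positions dict of B: items = ordered distinct kept words, each with its list of positions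
theorem positions_items (v : List String) :
    ((v.zipIdx).foldl (fun d p => d.modify p.1 [] (· ++ [p.2])) PySem.Dict.empty).items
    = (PySem.Set.ofList v).map (fun w => (w, ((v.zipIdx).filter (fun p => p.1 == w)).map (·.2))) := by
  set G := (v.zipIdx).foldl (fun d p => d.modify p.1 [] (· ++ [p.2])) PySem.Dict.empty with hG
  have hnd : G.keys.Nodup := by
    exact PySem.Dict.nodup_keys_foldl_modify_key (v.zipIdx) Prod.fst []
      (fun d p => (· ++ [p.2])) PySem.Dict.empty (by simp)
  have hkeys : G.keys = PySem.Set.ofList v := by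
    rw [hG, PySem.Dict.keys_foldl_modify_key]
    simp [PySem.Set.update, PySem.Dict.keys_empty, PySem.Set.ofList_eq_foldl]
  rw [PySem.Dict.items_eq_map_keys G hnd [], hkeys]
  refine List.map_congr_left (fun w _ => ?_)
  congr 1
  rw [hG, PySem.Dict.getD_foldl_modify_append]
  simp [PySem.Dict.getD_empty]

-- scattering one group's value into the buffer: pointwise effect
theorem scatter_group_getElem (ps : List Nat) (wi : Int) (e : List Int)
    (hps : ∀ p ∈ ps, p < e.length) (i : Nat) :
    (ps.foldl (fun e p => e.set p wi) e)[i]? = if i ∈ ps then some wi else e[i]? := by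
  induction ps generalizing e with
  | nil => simp
  | cons p rest ih =>
    have hp : p < e.length := hps p (by simp)
    rw [List.foldl_cons, ih _ (fun q hq => by simpa using hps q (by simp [hq]))]
    by_cases hi : i ∈ rest
    · simp [hi]
    · by_cases hip : i = p
      · subst hip
        rw [if_neg hi, if_pos (List.mem_cons_self), List.getElem?_set_self']
        simp [List.getElem?_eq_getElem hp]
      · rw [if_neg hi, if_neg (by simp [hip, hi])]
        exact List.getElem?_set_ne fun a => hip (id (Eq.symm a))

theorem scatter_group_length (ps : List Nat) (wi : Int) (e : List Int) :
    (ps.foldl (fun e p => e.set p wi) e).length = e.length := by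
  induction ps generalizing e with
  | nil => rfl
  | cons p rest ih => simp [ih]

-- scattering all groups: provided each group's positions carry that group's word,
-- the buffer ends holding f(word at that position) wherever it is covered
theorem scatter_getElem (f : String → Int) (v : List String)
    (L : List (String × List Nat)) (e : List Int) (hlen : e.length = v.length)
    (hok : ∀ pr ∈ L, ∀ p ∈ pr.2, p < v.length ∧ v[p]? = some pr.1) (i : Nat) :
    (L.foldl (fun enc pr => pr.2.foldl (fun e p => e.set p (f pr.1)) enc) e)[i]?
      = if (∃ pr ∈ L, i ∈ pr.2) then (v[i]?).map f else e[i]? := by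
  induction L generalizing e with
  | nil => simp
  | cons pr rest ih =>
    have hlen' : (pr.2.foldl (fun e p => e.set p (f pr.1)) e).length = v.length := by
      rw [scatter_group_length]; exact hlen
    rw [List.foldl_cons, ih _ hlen' (fun q hq => hok q (by simp [hq]))]
    by_cases hr : ∃ q ∈ rest, i ∈ q.2
    · simp [hr]
    · have hstep := scatter_group_getElem pr.2 (f pr.1) e
        (fun p hp => by rw [hlen]; exact (hok pr (by simp) p hp).1) i
      by_cases hi : i ∈ pr.2
      · have := (hok pr (by simp) i hi).2
        simp [hr, hi, hstep, this]
      · have : ¬ ∃ q ∈ pr :: rest, i ∈ q.2 := by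
          rintro ⟨q, hq, hiq⟩
          rcases List.mem_cons.mp hq with h | h
          · exact hi (h ▸ hiq)
          · exact hr ⟨q, h, hiq⟩
        simp [hr, hi, hstep]

-- positions within a group are exactly the indices of that word
theorem mem_group_iff (v : List String) (w : String) (i : Nat) :
    i ∈ ((v.zipIdx).filter (fun p => p.1 == w)).map (·.2) ↔ v[i]? = some w := by
  simp only [List.mem_map, List.mem_filter]
  constructor
  · rintro ⟨⟨a, j⟩, ⟨hmem, ha⟩, rfl⟩
    have hget := List.mk_mem_zipIdx_iff_getElem?.mp hmem
    simp only [beq_iff_eq] at ha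
    simpa [ha] using hget
  · intro h
    have hlt : i < v.length := (List.getElem?_eq_some_iff.mp h).1
    exact ⟨(w, i), ⟨List.mk_mem_zipIdx_iff_getElem?.mpr h, by simp⟩, rfl⟩

-- group size = word count
theorem countP_zipIdx_fst (v : List String) (w : String) (k : Nat) :
    (v.zipIdx k).countP (fun p => p.1 == w) = v.countP (· == w) := by
  induction v generalizing k with
  | nil => rfl
  | cons x rest ih => simp [List.zipIdx_cons, List.countP_cons, ih]

theorem group_length_eq_count (v : List String) (w : String) :
    (((v.zipIdx).filter (fun p => p.1 == w)).map (·.2)).length = v.count w := by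
  rw [List.length_map, ← List.countP_eq_length_filter, List.count_eq_countP]
  exact countP_zipIdx_fst v w 0

-- ===== VERDICT (by name: the statement is the Claim_ definition above) =====
theorem iterate_doc_spec : Claim_equal_iterate_doc := by
  intro doc word_index _
  unfold Spec_iterate_doc iterate_doc iterate_doc_alt
  rw [foldA_split]
  conv_rhs => rw [PySem.List.foldl_if_eq_foldl_filter
    (p := fun w => (pvLookup word_index w).isSome)
    (f := fun (st : PySem.Dict String (List Nat) × Nat) w =>
      (st.1.modify w [] (· ++ [st.2]), st.2 + 1))]
  rw [foldB1_eq_zipIdx]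
  set f : String → Int := fun w => (pvLookup word_index w).getD 0 with hf
  set v : List String := doc.filter (fun w => (pvLookup word_index w).isSome) with hv
  simp only [Nat.zero_add]
  rw [positions_items]
  set L : List (String × List Nat) :=
    (PySem.Set.ofList v).map (fun w => (w, ((v.zipIdx).filter (fun p => p.1 == w)).map (·.2))) with hL
  have hok : ∀ pr ∈ L, ∀ p ∈ pr.2, p < v.length ∧ v[p]? = some pr.1 := by
    rintro pr hpr p hp
    obtain ⟨w, _, rfl⟩ := List.mem_map.mp hpr
    have := (mem_group_iff v w p).mp hp
    exact ⟨(List.getElem?_eq_some_iff.mp this).1, this⟩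
  -- split the second fold's two independent accumulators
  have hsplit := PySem.List.foldl_prod_mk
    (fun enc (pr : String × List Nat) =>
      pr.2.foldl (fun e p => e.set p ((pvLookup word_index pr.1).getD 0)) enc)
    (fun d (pr : String × List Nat) => d.insert pr.1 (pr.2.length : Int))
    L (List.replicate v.length (0 : Int)) PySem.Dict.empty
  beta_reduce at hsplit
  rw [hsplit]
  refine Prod.ext ?_ ?_
  · -- encoded: scatter = map
    show v.map f = _
    refine List.ext_getElem? (fun i => ?_)
    rw [scatter_getElem f v L _ (by simp) hok i]
    by_cases hi : i < v.length
    · have hcov : ∃ pr ∈ L, i ∈ pr.2 := by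
        refine ⟨(v[i], ((v.zipIdx).filter (fun p => p.1 == v[i])).map (·.2)),
          List.mem_map.mpr ⟨v[i], ?_, rfl⟩, (mem_group_iff v v[i] i).mpr (by simp [hi])⟩
        rw [PySem.Set.mem_ofList]; exact List.getElem_mem hi
      simp [hcov, hi]
    · have hncov : ¬ ∃ pr ∈ L, i ∈ pr.2 := by
        rintro ⟨pr, hpr, hip⟩; exact hi (hok pr hpr i hip).1
      have hle : v.length ≤ i := by omega
      rw [if_neg hncov, List.getElem?_eq_none (by simpa using hle),
        List.getElem?_eq_none (by simpa using hle)]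
  · -- counts: fresh-key inserts over the groups = counter items
    show (PySem.Dict.counter v).items
      = (L.foldl (fun d pr => d.insert pr.1 (pr.2.length : Int)) PySem.Dict.empty).items
    have hfresh := PySem.Dict.items_foldl_insert_fresh L Prod.fst
        (fun pr => (pr.2.length : Int)) PySem.Dict.empty
        (by intro a _; simp [PySem.Dict.contains_empty])
        (by rw [hL, List.map_map]
            have hid : (Prod.fst ∘ fun w =>
                (w, ((v.zipIdx).filter (fun p => p.1 == w)).map (·.2))) = id := rfl
            rw [hid, List.map_id]
            exact PySem.Set.nodup_ofList v)
    beta_reduce at hfresh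
    have hemp : (PySem.Dict.empty : PySem.Dict String Int).items = [] := rfl
    rw [hfresh, hemp, List.nil_append, PySem.Dict.items_counter, hL, List.map_map]
    exact List.map_congr_left (fun w _ => by
      have h := group_length_eq_count v w
      rw [List.length_map] at h
      simp [h])
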